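-- pv_equiv track=rewrite | github.com/msatul1305/Linux | Flask_py/app.py | calculate
-- ===== SOURCE A (Python) =====
-- def calculate(strategies, input_values):
--     n = len(input_values)
--     max_diff_array = [0] * n
--
--     for i in range(n - 1, 0, -1):
--         max_diff = 0
--         for j in range(i - 1, -1, -1):
--             max_diff = max(max_diff, input_values[i] - input_values[j])
--         max_diff_array[i] = max_diff
--
--     max_diff_array.sort(reverse=True)
--     return sum(max_diff_array[:strategies])
-- ===== SOURCE B (Python) =====
-- def calculate(strategies, input_values):
--     # One forward pass with a running prefix minimum, then sort and take the top slice.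
--     diffs = []
--     if input_values:
--         m = input_values[0]
--         diffs.append(0)
--         for v in input_values[1:]:
--             diffs.append(max(0, v - m))
--             if v < m:
--                 m = v
--     diffs.sort(reverse=True)
--     return sum(diffs[:strategies])
-- ===== Notes on version B (the rewrite author's own statement) =====
-- stated objective: faster
-- what changed: Replaced the quadratic inner scan (for each i, rescan all j<i for the max difference) by a single forward pass keeping a running prefix minimum, then sort and sum the top slice.
import Mathlib
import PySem

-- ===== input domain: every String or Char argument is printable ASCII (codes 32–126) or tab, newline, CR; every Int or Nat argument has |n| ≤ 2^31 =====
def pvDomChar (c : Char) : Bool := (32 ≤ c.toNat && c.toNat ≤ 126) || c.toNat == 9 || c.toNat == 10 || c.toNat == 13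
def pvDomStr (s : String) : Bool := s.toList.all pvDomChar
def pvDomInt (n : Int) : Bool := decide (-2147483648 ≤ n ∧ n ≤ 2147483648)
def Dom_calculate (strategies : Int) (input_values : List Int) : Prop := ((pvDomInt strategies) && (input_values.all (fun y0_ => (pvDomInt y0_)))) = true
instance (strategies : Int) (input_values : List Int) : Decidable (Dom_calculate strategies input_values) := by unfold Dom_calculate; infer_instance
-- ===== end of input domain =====

-- B replaces A's quadratic rescan (for each i, all j < i) by one forward pass with a running
-- prefix minimum; same result, O(n log n) instead of O(n^2).

-- ===== PORT A =====
def calculate (strategies : Int) (input_values : List Int) : Int :=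
  let n : Int := (input_values.length : Int)
  let arr := (PySem.List.pyRange (n - 1) 0 (-1)).foldl
    (fun arr i =>
      let md := (PySem.List.pyRange (i - 1) (-1) (-1)).foldl
        (fun md j => max md (PySem.List.pyGetD input_values i 0 - PySem.List.pyGetD input_values j 0)) 0
      -- i ranges over 1..n-1, so i.toNat is exactly the (nonnegative) Python index
      arr.set i.toNat md)
    (List.replicate input_values.length (0 : Int))
  (PySem.List.slice (PySem.List.sorted arr id true) none (some strategies)).sum

-- ===== PORT B =====
-- the loop body: append max(0, v - m) then m = min(m, v)
def buildDiffs (m : Int) : List Int → List Int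
  | [] => []
  | v :: rest => max 0 (v - m) :: buildDiffs (min m v) rest

def calculate_alt (strategies : Int) (input_values : List Int) : Int :=
  let diffs : List Int :=
    match input_values with
    | [] => []
    | v0 :: rest => 0 :: buildDiffs v0 rest
  (PySem.List.slice (PySem.List.sorted diffs id true) none (some strategies)).sum

-- ===== PRECONDITION & SPEC =====
def Spec_calculate (strategies : Int) (input_values : List Int) (out : Int) : Prop := out = calculate_alt strategies input_values
instance (strategies : Int) (input_values : List Int) (out : Int) : Decidable (Spec_calculate strategies input_values out) := by unfold Spec_calculate; infer_instance

-- ===== CLAIM (what is proved, stated in full; the proofs are below) =====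
def Claim_equal_calculate : Prop := ∀ (strategies : Int) (input_values : List Int), Dom_calculate strategies input_values → Spec_calculate strategies input_values (calculate strategies input_values)

-- ===== LEMMAS AND PROOFS =====

-- minimum of xs[0..k] in A's (pyGetD) reading
def minUpTo (xs : List Int) : Nat → Int
  | 0 => PySem.List.pyGetD xs 0 0
  | k+1 => min (minUpTo xs k) (PySem.List.pyGetD xs ((k+1 : Nat) : Int) 0)

theorem foldl_max_sub (c : Int) (xs : List Int) :
    ∀ (k : Nat) (d : Int),
    (PySem.List.pyRange (k : Int) (-1) (-1)).foldl
      (fun md j => max md (c - PySem.List.pyGetD xs j 0)) d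
    = max d (c - minUpTo xs k) := by
  intro k
  induction k with
  | zero =>
    intro d
    rw [show ((0 : Nat) : Int) = (0 : Int) from rfl]
    rw [PySem.List.pyRange_neg_one_cons (by omega : (-1 : Int) < 0)]
    rw [PySem.List.pyRange_neg_one_eq_nil (by omega : (0 : Int) - 1 ≤ -1)]
    simp [minUpTo]
  | succ m ih =>
    intro d
    rw [PySem.List.pyRange_neg_one_cons (by push_cast; omega : (-1 : Int) < ((m + 1 : Nat) : Int))]
    rw [show ((m + 1 : Nat) : Int) - 1 = ((m : Nat) : Int) by push_cast; ring]
    rw [List.foldl_cons, ih]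
    simp only [minUpTo]
    omega

theorem minUpTo_eq (v0 : Int) (rest : List Int) :
    ∀ (k : Nat), k ≤ rest.length →
    minUpTo (v0 :: rest) k = (rest.take k).foldl min v0 := by
  intro k
  induction k with
  | zero =>
    intro _
    have h0 : ((0 : Nat) : Int) = (0 : Int) := rfl
    have := PySem.List.pyGetD_natCast (v0 :: rest) 0 0
    rw [h0] at this
    simp [minUpTo, this]
  | succ m ih =>
    intro hm
    have hmr : m < rest.length := by omega
    simp only [minUpTo]
    rw [ih (by omega)]
    rw [PySem.List.pyGetD_natCast (v0 :: rest) (m + 1) 0]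
    rw [List.take_add_one, List.foldl_append]
    have : rest[m]? = some rest[m] := List.getElem?_eq_getElem hmr
    simp [this, List.getD_eq_getElem?_getD]

theorem buildDiffs_length (rest : List Int) : ∀ (m : Int), (buildDiffs m rest).length = rest.length := by
  induction rest with
  | nil => intro m; rfl
  | cons v r ih => intro m; simp [buildDiffs, ih]

theorem buildDiffs_getElem? (rest : List Int) :
    ∀ (m : Int) (k : Nat), k < rest.length →
    (buildDiffs m rest)[k]? = some (max 0 (rest.getD k 0 - (rest.take k).foldl min m)) := by
  induction rest with
  | nil => intro m k h; simp at h
  | cons v r ih =>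
    intro m k h
    cases k with
    | zero => simp [buildDiffs]
    | succ j =>
      simp only [buildDiffs, List.getElem?_cons_succ]
      rw [ih (min m v) j (by simpa using h)]
      simp

theorem set_foldl_getElem? (f : Int → Int) :
    ∀ (js : List Int) (base : List Int) (k : Nat), (∀ j ∈ js, 0 ≤ j) →
    (js.foldl (fun a i => a.set i.toNat (f i)) base)[k]? =
      if (k : Int) ∈ js then (if k < base.length then some (f (k : Int)) else none) else base[k]? := by
  intro js
  induction js with
  | nil => intro base k _; simp
  | cons i rest ih =>
    intro base k hnn
    have hi : 0 ≤ i := hnn i (List.mem_cons_self)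
    rw [List.foldl_cons, ih (base.set i.toNat (f i)) k (fun j hj => hnn j (List.mem_cons_of_mem i hj))]
    have hlen : (base.set i.toNat (f i)).length = base.length := List.length_set
    have hset : (base.set i.toNat (f i))[k]? =
        if i.toNat = k then (if i.toNat < base.length then some (f i) else none) else base[k]? :=
      List.getElem?_set
    have heq : (i.toNat = k) ↔ ((k : Int) = i) := by omega
    by_cases hmem : (k : Int) ∈ rest
    · simp only [hlen, hmem, if_pos, List.mem_cons, or_true]
    · simp only [hmem, if_false, hset, List.mem_cons]
      by_cases hik : (k : Int) = i
      · have htn : i.toNat = k := by omega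
        simp [htn, hik]
      · have htn : ¬ (i.toNat = k) := by omega
        simp [htn, hik]

theorem lists_eq (input_values : List Int) :
    (PySem.List.pyRange ((input_values.length : Int) - 1) 0 (-1)).foldl
      (fun arr i => arr.set i.toNat
        ((PySem.List.pyRange (i - 1) (-1) (-1)).foldl
          (fun md j => max md (PySem.List.pyGetD input_values i 0 - PySem.List.pyGetD input_values j 0)) 0))
      (List.replicate input_values.length (0 : Int))
    = (match input_values with
       | [] => []
       | v0 :: rest => 0 :: buildDiffs v0 rest) := by
  cases input_values with
  | nil =>
    rw [PySem.List.pyRange_neg_one_eq_nil (by simp : ((([] : List Int).length : Int) - 1 ≤ 0))]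
    simp
  | cons v0 rest =>
    apply List.ext_getElem?
    intro k
    have hnn : ∀ j ∈ PySem.List.pyRange ((((v0 :: rest) : List Int).length : Int) - 1) 0 (-1), 0 ≤ j := by
      intro j hj
      have := PySem.List.mem_pyRange_neg_one.mp hj
      omega
    rw [set_foldl_getElem? _ _ _ k hnn]
    have hmem : ((k : Int) ∈ PySem.List.pyRange ((((v0 :: rest) : List Int).length : Int) - 1) 0 (-1)) ↔ (0 < k ∧ k < (v0 :: rest).length) := by
      rw [PySem.List.mem_pyRange_neg_one]
      omega
    cases k with
    | zero =>
      have : ¬ ((0 : Int) ∈ PySem.List.pyRange ((((v0 :: rest) : List Int).length : Int) - 1) 0 (-1)) := by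
        rw [PySem.List.mem_pyRange_neg_one]; omega
      simp
    | succ m =>
      by_cases hk : m < rest.length
      · have hm : ((m + 1 : Nat) : Int) ∈ PySem.List.pyRange ((((v0 :: rest) : List Int).length : Int) - 1) 0 (-1) := by
          rw [hmem]; simp; omega
        rw [if_pos hm, if_pos (by simp; omega : m + 1 < (List.replicate ((v0 :: rest) : List Int).length (0 : Int)).length)]
        rw [show ((m + 1 : Nat) : Int) - 1 = ((m : Nat) : Int) by push_cast; ring]
        rw [foldl_max_sub (PySem.List.pyGetD (v0 :: rest) ((m + 1 : Nat) : Int) 0) (v0 :: rest) m 0]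
        rw [minUpTo_eq v0 rest m (by omega)]
        rw [PySem.List.pyGetD_natCast (v0 :: rest) (m + 1) 0]
        rw [List.getElem?_cons_succ, buildDiffs_getElem? rest v0 m hk]
        simp
      · have hm : ¬ (((m + 1 : Nat) : Int) ∈ PySem.List.pyRange ((((v0 :: rest) : List Int).length : Int) - 1) 0 (-1)) := by
          rw [hmem]; simp; omega
        rw [if_neg hm]
        rw [List.getElem?_eq_none (by simp; omega), List.getElem?_eq_none (by simp [buildDiffs_length]; omega)]

-- ===== VERDICT (by name: the statement is the Claim_ definition above) =====
theorem calculate_spec : Claim_equal_calculate := by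
  intro strategies input_values _
  unfold Spec_calculate
  simp only [calculate, calculate_alt]
  rw [lists_eq]
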